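-- pv_equiv track=rewrite | github.com/SCC-Dev-256/Archivist | core/scc_summarizer.py | extract_text_from_hex
-- ===== SOURCE A (Python) =====
-- def extract_text_from_hex(hex_data: str) -> str:
--     """
--     Extract readable text from SCC hexadecimal data.
--
--     Args:
--         hex_data: Hexadecimal string from SCC file
--
--     Returns:
--         Extracted text string
--     """
--     # CEA-608 hex to character mapping (basic implementation)
--     hex_to_char = {
--         '20': ' ', '21': '!', '22': '"', '23': '#', '24': '$', '25': '%', '26': '&', '27': "'",
--         '28': '(', '29': ')', '2A': '*', '2B': '+', '2C': ',', '2D': '-', '2E': '.', '2F': '/',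
--         '30': '0', '31': '1', '32': '2', '33': '3', '34': '4', '35': '5', '36': '6', '37': '7',
--         '38': '8', '39': '9', '3A': ':', '3B': ';', '3C': '<', '3D': '=', '3E': '>', '3F': '?',
--         '40': '@', '41': 'A', '42': 'B', '43': 'C', '44': 'D', '45': 'E', '46': 'F', '47': 'G',
--         '48': 'H', '49': 'I', '4A': 'J', '4B': 'K', '4C': 'L', '4D': 'M', '4E': 'N', '4F': 'O',
--         '50': 'P', '51': 'Q', '52': 'R', '53': 'S', '54': 'T', '55': 'U', '56': 'V', '57': 'W',
--         '58': 'X', '59': 'Y', '5A': 'Z', '5B': '[', '5C': '\\', '5D': ']', '5E': '^', '5F': '_',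
--         '60': '`', '61': 'a', '62': 'b', '63': 'c', '64': 'd', '65': 'e', '66': 'f', '67': 'g',
--         '68': 'h', '69': 'i', '6A': 'j', '6B': 'k', '6C': 'l', '6D': 'm', '6E': 'n', '6F': 'o',
--         '70': 'p', '71': 'q', '72': 'r', '73': 's', '74': 't', '75': 'u', '76': 'v', '77': 'w',
--         '78': 'x', '79': 'y', '7A': 'z', '7B': '{', '7C': '|', '7D': '}', '7E': '~'
--     }
--
--     # Skip control codes and extract text
--     control_codes = {'94ae', '9420', '942c', '942f', '8080', '947a', '94f2', '9452', '97a2'}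
--
--     text_parts = []
--     hex_words = hex_data.split()
--
--     for hex_word in hex_words:
--         if hex_word.lower() in control_codes:
--             continue
--
--         # Process word in pairs of hex characters
--         for i in range(0, len(hex_word), 2):
--             if i + 1 < len(hex_word):
--                 hex_char = hex_word[i:i+2].upper()
--                 if hex_char in hex_to_char:
--                     text_parts.append(hex_to_char[hex_char])
--
--     return ''.join(text_parts)
-- ===== SOURCE B (Python) =====
-- # Single-pass state machine over the raw characters: no split(), no index loop,
-- # no lookup table.  The current word's lowered chars, its decoded chars and a
-- # pending high hex digit are carried as state; a whitespace char flushes the word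
-- # (dropping it if it is a control code).  A trailing sentinel space flushes the end.
--
-- _HEX_DIGITS = "0123456789abcdef"
--
-- _CONTROL_CODES = {'94ae', '9420', '942c', '942f', '8080', '947a', '94f2', '9452', '97a2'}
--
--
-- def _hex_val(c: str) -> int:
--     """Value of one hex digit, or -1 if c is not a hex digit."""
--     return _HEX_DIGITS.find(c.lower())
--
--
-- def extract_text_from_hex(hex_data: str) -> str:
--     out = []       # decoded chars of all completed, non-control words
--     word = []      # lowered chars of the current word
--     decoded = []   # decoded chars of the current word
--     hi = None      # pending high hex-digit value of an unfinished pair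
--     for ch in hex_data + ' ':
--         if ch.isspace():
--             if word and ''.join(word) not in _CONTROL_CODES:
--                 out.extend(decoded)
--             word = []
--             decoded = []
--             hi = None
--         else:
--             word.append(ch.lower())
--             v = _hex_val(ch)
--             if hi is None:
--                 hi = v
--             else:
--                 if hi >= 0 and v >= 0 and 0x20 <= hi * 16 + v <= 0x7E:
--                     decoded.append(chr(hi * 16 + v))
--                 hi = None
--     return ''.join(out)
-- ===== Notes on version B (the rewrite author's own statement) =====
-- stated objective: alternative
-- what changed: Replaces A's split()-then-nested-index-loop with a table lookup by a single-pass character state machine over the raw string: it carries the current word's lowered chars, its decoded chars and a pending high hex-digit as state, decodes pairs arithmetically as characters arrive, and flushes (or drops, for control codes) a word when whitespace is reached.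
import Mathlib
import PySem

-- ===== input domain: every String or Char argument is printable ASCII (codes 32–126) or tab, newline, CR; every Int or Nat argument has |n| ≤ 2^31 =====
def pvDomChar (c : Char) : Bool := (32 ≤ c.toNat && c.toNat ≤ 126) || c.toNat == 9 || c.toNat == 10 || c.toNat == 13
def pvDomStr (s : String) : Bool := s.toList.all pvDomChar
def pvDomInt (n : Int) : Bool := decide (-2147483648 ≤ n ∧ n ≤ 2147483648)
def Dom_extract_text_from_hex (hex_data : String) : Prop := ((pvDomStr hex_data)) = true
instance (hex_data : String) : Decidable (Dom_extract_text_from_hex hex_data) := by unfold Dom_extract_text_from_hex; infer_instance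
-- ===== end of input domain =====

-- B replaces A's split()+nested index loop+lookup table by a single-pass character state
-- machine that decodes hex pairs arithmetically as characters arrive; objective: alternative, same O(n) cost.

-- ===== PORT A =====
def pvHexPairsList : List (String × String) := [
  ("20", " "), ("21", "!"), ("22", "\""), ("23", "#"), ("24", "$"), ("25", "%"),
  ("26", "&"), ("27", "'"), ("28", "("), ("29", ")"), ("2A", "*"), ("2B", "+"),
  ("2C", ","), ("2D", "-"), ("2E", "."), ("2F", "/"), ("30", "0"), ("31", "1"),
  ("32", "2"), ("33", "3"), ("34", "4"), ("35", "5"), ("36", "6"), ("37", "7"),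
  ("38", "8"), ("39", "9"), ("3A", ":"), ("3B", ";"), ("3C", "<"), ("3D", "="),
  ("3E", ">"), ("3F", "?"), ("40", "@"), ("41", "A"), ("42", "B"), ("43", "C"),
  ("44", "D"), ("45", "E"), ("46", "F"), ("47", "G"), ("48", "H"), ("49", "I"),
  ("4A", "J"), ("4B", "K"), ("4C", "L"), ("4D", "M"), ("4E", "N"), ("4F", "O"),
  ("50", "P"), ("51", "Q"), ("52", "R"), ("53", "S"), ("54", "T"), ("55", "U"),
  ("56", "V"), ("57", "W"), ("58", "X"), ("59", "Y"), ("5A", "Z"), ("5B", "["),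
  ("5C", "\\"), ("5D", "]"), ("5E", "^"), ("5F", "_"), ("60", "`"), ("61", "a"),
  ("62", "b"), ("63", "c"), ("64", "d"), ("65", "e"), ("66", "f"), ("67", "g"),
  ("68", "h"), ("69", "i"), ("6A", "j"), ("6B", "k"), ("6C", "l"), ("6D", "m"),
  ("6E", "n"), ("6F", "o"), ("70", "p"), ("71", "q"), ("72", "r"), ("73", "s"),
  ("74", "t"), ("75", "u"), ("76", "v"), ("77", "w"), ("78", "x"), ("79", "y"),
  ("7A", "z"), ("7B", "{"), ("7C", "|"), ("7D", "}"), ("7E", "~")]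

def pvHexToChar : PySem.Dict String String := PySem.Dict.ofList pvHexPairsList

def pvControlCodes : PySem.Set String :=
  PySem.Set.ofList ["94ae", "9420", "942c", "942f", "8080", "947a", "94f2", "9452", "97a2"]

def extract_text_from_hex (hex_data : String) : String :=
  let hexWords := PySem.Str.split₀ hex_data
  let textParts := hexWords.foldl (fun parts hexWord =>
    if pvControlCodes.contains (PySem.Str.lower hexWord) then parts
    else
      (PySem.List.pyRange 0 (PySem.Str.len hexWord) 2).foldl (fun parts i =>
        if i + 1 < PySem.Str.len hexWord then
          match pvHexToChar.get? (PySem.Str.upper (PySem.Str.slice hexWord (some i) (some (i + 2)))) with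
          | some c => parts ++ [c]
          | none => parts
        else parts) parts) []
  PySem.Str.join "" textParts

-- ===== PORT B =====
def pvHexDigits : String := "0123456789abcdef"

def pvControlCodesB : PySem.Set String :=
  PySem.Set.ofList ["94ae", "9420", "942c", "942f", "8080", "947a", "94f2", "9452", "97a2"]

def pvHexVal (c : Char) : Int :=
  PySem.Str.find pvHexDigits (PySem.Str.lower (String.ofList [c]))

-- the loop body of Source B: state = (out, word, decoded, hi); 'word' holds the current
-- word's lowered chars (Python appends 1-char strings; ''.join(word) = String.ofList word)
def pvStepB (st : List String × List Char × List String × Option Int) (ch : Char) :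
    List String × List Char × List String × Option Int :=
  let (out, word, decoded, hi) := st
  if PySem.Chars.isspace ch then
    (if word ≠ [] ∧ ¬ pvControlCodesB.contains (String.ofList word) then out ++ decoded else out,
     [], [], none)
  else
    let word' := word ++ [PySem.Chars.lowerChar ch]
    let v := pvHexVal ch
    match hi with
    | none => (out, word', decoded, some v)
    | some h =>
        (out, word',
         if 0 ≤ h ∧ 0 ≤ v ∧ 32 ≤ h * 16 + v ∧ h * 16 + v ≤ 126 then
           decoded ++ [String.ofList [Char.ofNat (h * 16 + v).toNat]]
         else decoded,
         none)

def extract_text_from_hex_alt (hex_data : String) : String :=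
  -- 'for ch in hex_data + " "' iterates the concatenation char by char (exact)
  let st := (hex_data.toList ++ [' ']).foldl pvStepB ([], [], [], none)
  PySem.Str.join "" st.1

-- ===== PRECONDITION & SPEC =====
def Spec_extract_text_from_hex (hex_data : String) (out : String) : Prop := out = extract_text_from_hex_alt hex_data
instance (hex_data : String) (out : String) : Decidable (Spec_extract_text_from_hex hex_data out) := by unfold Spec_extract_text_from_hex; infer_instance

-- ===== CLAIM (what is proved, stated in full; the proofs are below) =====
def Claim_equal_extract_text_from_hex : Prop := ∀ (hex_data : String), Dom_extract_text_from_hex hex_data → Spec_extract_text_from_hex hex_data (extract_text_from_hex hex_data)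

-- ===== LEMMAS AND PROOFS =====

-- two-step induction principle on lists
theorem pvTwoStep {α : Type} {motive : List α → Prop} (h0 : motive [])
    (h1 : ∀ a, motive [a]) (h2 : ∀ a b t, motive t → motive (a :: b :: t)) :
    ∀ l, motive l
  | [] => h0
  | [a] => h1 a
  | a :: b :: t => h2 a b t (pvTwoStep h0 h1 h2 t)

-- proof-side vocabulary
def pvHD : List Char := ['0','1','2','3','4','5','6','7','8','9','A','B','C','D','E','F']
def pvHexU (d : Nat) : Char := pvHD.getD d '?'

def pvOptPart (a b : Char) : List String :=
  match pvHexToChar.get? (String.ofList (PySem.Chars.upper [a, b])) with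
  | some c => [c]
  | none => []

def pvBPart (a b : Char) : List String :=
  if 0 ≤ pvHexVal a ∧ 0 ≤ pvHexVal b ∧
      32 ≤ pvHexVal a * 16 + pvHexVal b ∧ pvHexVal a * 16 + pvHexVal b ≤ 126 then
    [String.ofList [Char.ofNat (pvHexVal a * 16 + pvHexVal b).toNat]]
  else []

def pvPairsA : List Char → List String
  | a :: b :: t => pvOptPart a b ++ pvPairsA t
  | _ => []

def pvDecode : List Char → List String
  | a :: b :: t => pvBPart a b ++ pvDecode t
  | _ => []

def pvPend : List Char → Option Int
  | [] => none
  | [a] => some (pvHexVal a)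
  | _ :: _ :: t => pvPend t

def pvWordOutA (w : String) : List String :=
  if pvControlCodes.contains (PySem.Str.lower w) then [] else pvPairsA w.toList

def pvWordOutB (cs : List Char) : List String :=
  if pvControlCodesB.contains (String.ofList (PySem.Chars.lower cs)) then [] else pvDecode cs

-- the dictionary, as its literal items list
set_option maxRecDepth 10000 in
theorem pvHexToChar_mk : pvHexToChar = PySem.Dict.mk pvHexPairsList := by rfl

set_option maxRecDepth 10000 in
theorem pv_nodup_keys : pvHexToChar.keys.Nodup := by
  rw [pvHexToChar_mk]; decide

set_option maxRecDepth 40000 in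
set_option maxHeartbeats 2000000 in
theorem pv_pos_mem : ∀ v ∈ List.range 127, 32 ≤ v →
    (String.ofList [pvHexU (v / 16), pvHexU (v % 16)], String.ofList [Char.ofNat v]) ∈ pvHexPairsList := by
  decide

set_option maxRecDepth 40000 in
set_option maxHeartbeats 2000000 in
theorem pv_neg_notmem : ∀ h ∈ List.range 16, ∀ l ∈ List.range 16,
    ¬(32 ≤ 16 * h + l ∧ 16 * h + l ≤ 126) →
    String.ofList [pvHexU h, pvHexU l] ∉ pvHexPairsList.map Prod.fst := by
  decide

set_option maxRecDepth 10000 in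
set_option maxHeartbeats 2000000 in
theorem pv_keyshape_bool :
    pvHexPairsList.all (fun p => pvHD.any (fun x => pvHD.any (fun y => p.1 == String.ofList [x, y]))) = true := by
  decide

theorem pv_keyshape : ∀ k ∈ pvHexPairsList.map Prod.fst,
    ∃ x ∈ pvHD, ∃ y ∈ pvHD, k = String.ofList [x, y] := by
  intro k hk
  obtain ⟨p, hp, hpk⟩ := List.mem_map.mp hk
  have := List.all_eq_true.mp pv_keyshape_bool p hp
  obtain ⟨x, hx, h2⟩ := List.any_eq_true.mp this
  obtain ⟨y, hy, h3⟩ := List.any_eq_true.mp h2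
  exact ⟨x, hx, y, hy, hpk ▸ (eq_of_beq h3)⟩

set_option maxRecDepth 40000 in
set_option maxHeartbeats 2000000 in
theorem pv_F1 : ∀ n ∈ List.range 127, 0 ≤ pvHexVal (Char.ofNat n) →
    pvHexVal (Char.ofNat n) < 16 ∧
    PySem.Chars.upperChar (Char.ofNat n) = pvHexU (pvHexVal (Char.ofNat n)).toNat := by
  decide

set_option maxRecDepth 40000 in
set_option maxHeartbeats 2000000 in
theorem pv_F2 : ∀ n ∈ List.range 127, pvHexVal (Char.ofNat n) < 0 →
    PySem.Chars.upperChar (Char.ofNat n) ∉ pvHD := by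
  decide

theorem pv_keys_eq : pvHexToChar.keys = pvHexPairsList.map Prod.fst := by
  rw [pvHexToChar_mk]; exact PySem.Dict.keys_mk pvHexPairsList

theorem pv_pair_eq (a b : Char) (ha : pvDomChar a = true) (hb : pvDomChar b = true) :
    pvOptPart a b = pvBPart a b := by
  have ha127 : a.toNat < 127 := by simp [pvDomChar] at ha; omega
  have hb127 : b.toNat < 127 := by simp [pvDomChar] at hb; omega
  have hF1a := pv_F1 a.toNat (List.mem_range.mpr ha127)
  have hF1b := pv_F1 b.toNat (List.mem_range.mpr hb127)
  have hF2a := pv_F2 a.toNat (List.mem_range.mpr ha127)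
  have hF2b := pv_F2 b.toNat (List.mem_range.mpr hb127)
  rw [Char.ofNat_toNat] at hF1a hF1b hF2a hF2b
  have hupper : PySem.Chars.upper [a, b] = [PySem.Chars.upperChar a, PySem.Chars.upperChar b] := by
    simp [PySem.Chars.upper]
  unfold pvOptPart pvBPart
  rw [hupper]
  by_cases h0 : 0 ≤ pvHexVal a
  · by_cases l0 : 0 ≤ pvHexVal b
    · obtain ⟨ha16, hua⟩ := hF1a h0
      obtain ⟨hb16, hub⟩ := hF1b l0
      by_cases hv : 32 ≤ pvHexVal a * 16 + pvHexVal b ∧ pvHexVal a * 16 + pvHexVal b ≤ 126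
      · have hvmem : (pvHexVal a * 16 + pvHexVal b).toNat ∈ List.range 127 :=
          List.mem_range.mpr (by omega)
        have hmem := pv_pos_mem _ hvmem (by omega)
        have hdiv : (pvHexVal a * 16 + pvHexVal b).toNat / 16 = (pvHexVal a).toNat := by omega
        have hmod : (pvHexVal a * 16 + pvHexVal b).toNat % 16 = (pvHexVal b).toNat := by omega
        rw [hdiv, hmod] at hmem
        have hget : pvHexToChar.get? (String.ofList [PySem.Chars.upperChar a, PySem.Chars.upperChar b])
            = some (String.ofList [Char.ofNat (pvHexVal a * 16 + pvHexVal b).toNat]) := by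
          rw [hua, hub]
          refine (PySem.Dict.get?_eq_some_iff_mem_items _ _ _ pv_nodup_keys).mpr ?_
          rw [pvHexToChar_mk]
          exact hmem
        rw [hget, if_pos ⟨h0, l0, hv.1, hv.2⟩]
      · have hnm := pv_neg_notmem (pvHexVal a).toNat (List.mem_range.mpr (by omega))
          (pvHexVal b).toNat (List.mem_range.mpr (by omega)) (by omega)
        have hget : pvHexToChar.get? (String.ofList [PySem.Chars.upperChar a, PySem.Chars.upperChar b])
            = none := by
          rw [hua, hub]
          refine (PySem.Dict.get?_eq_none_iff_not_mem_keys _ _).mpr ?_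
          rw [pv_keys_eq]
          exact hnm
        rw [hget, if_neg (fun hc => hv ⟨hc.2.2.1, hc.2.2.2⟩)]
    · have hub' := hF2b (by omega)
      have hget : pvHexToChar.get? (String.ofList [PySem.Chars.upperChar a, PySem.Chars.upperChar b])
          = none := by
        refine (PySem.Dict.get?_eq_none_iff_not_mem_keys _ _).mpr ?_
        rw [pv_keys_eq]
        intro hmemk
        obtain ⟨x, hx, y, hy, hk⟩ := pv_keyshape _ hmemk
        have : [PySem.Chars.upperChar a, PySem.Chars.upperChar b] = [x, y] := by
          have := congrArg String.toList hk
          simpa using this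
        exact hub' (by simp_all)
      rw [hget, if_neg (fun hc => l0 hc.2.1)]
  · have hua' := hF2a (by omega)
    have hget : pvHexToChar.get? (String.ofList [PySem.Chars.upperChar a, PySem.Chars.upperChar b])
        = none := by
      refine (PySem.Dict.get?_eq_none_iff_not_mem_keys _ _).mpr ?_
      rw [pv_keys_eq]
      intro hmemk
      obtain ⟨x, hx, y, hy, hk⟩ := pv_keyshape _ hmemk
      have : [PySem.Chars.upperChar a, PySem.Chars.upperChar b] = [x, y] := by
        have := congrArg String.toList hk
        simpa using this
      exact hua' (by simp_all)
    rw [hget, if_neg (fun hc => h0 hc.1)]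

-- characters of split words come from the original string
theorem pv_go_chars : ∀ (s cur : List Char) (accL : List (List Char)),
    ∀ w ∈ PySem.Chars.split₀.go s cur accL, ∀ c ∈ w, c ∈ s ∨ c ∈ cur ∨ ∃ u ∈ accL, c ∈ u := by
  intro s
  induction s with
  | nil =>
    intro cur accL w hw c hc
    simp only [PySem.Chars.split₀.go] at hw
    by_cases hce : cur.isEmpty = true
    · rw [if_pos hce] at hw
      exact Or.inr (Or.inr ⟨w, List.mem_reverse.mp hw, hc⟩)
    · rw [if_neg hce] at hw
      rcases List.mem_cons.mp (List.mem_reverse.mp hw) with h | h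
      · exact Or.inr (Or.inl (List.mem_reverse.mp (h ▸ hc)))
      · exact Or.inr (Or.inr ⟨w, h, hc⟩)
  | cons ch rest IH =>
    intro cur accL w hw c hc
    simp only [PySem.Chars.split₀.go] at hw
    by_cases hsp : PySem.Chars.isspace ch = true
    · rw [if_pos hsp] at hw
      by_cases hce : cur.isEmpty = true
      · rw [if_pos hce] at hw
        rcases IH [] accL w hw c hc with h | h | h
        · exact Or.inl (List.mem_cons_of_mem _ h)
        · simp at h
        · exact Or.inr (Or.inr h)
      · rw [if_neg hce] at hw
        rcases IH [] (cur.reverse :: accL) w hw c hc with h | h | ⟨u, hu, hcu⟩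
        · exact Or.inl (List.mem_cons_of_mem _ h)
        · simp at h
        · rcases List.mem_cons.mp hu with h | h
          · exact Or.inr (Or.inl (List.mem_reverse.mp (h ▸ hcu)))
          · exact Or.inr (Or.inr ⟨u, h, hcu⟩)
    · rw [if_neg hsp] at hw
      rcases IH (ch :: cur) accL w hw c hc with h | h | h
      · exact Or.inl (List.mem_cons_of_mem _ h)
      · rcases List.mem_cons.mp h with h | h
        · exact Or.inl (h ▸ List.mem_cons_self)
        · exact Or.inr (Or.inl h)
      · exact Or.inr (Or.inr h)

theorem pv_split₀_chars (l : List Char) : ∀ w ∈ PySem.Chars.split₀ l, ∀ c ∈ w, c ∈ l := by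
  intro w hw c hc
  rcases pv_go_chars l [] [] w (by simpa [PySem.Chars.split₀] using hw) c hc with h | h | h
  · exact h
  · simp at h
  · simp at h

-- A's inner loop
theorem pv_pyRange_two_cons (n : Int) (hn : 0 < n) :
    PySem.List.pyRange 0 n 2 = 0 :: (PySem.List.pyRange 0 (n - 2) 2).map (· + 2) := by
  rw [PySem.List.pyRange_of_pos 0 n (by norm_num), PySem.List.pyRange_of_pos 0 (n - 2) (by norm_num)]
  rw [if_pos hn]
  by_cases h2n : 0 < n - 2
  · rw [if_pos h2n]
    rw [show n - 0 + 2 - 1 = n + 1 by ring, show n - 2 - 0 + 2 - 1 = n - 1 by ring,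
      show ((n + 1) / 2).toNat = ((n - 1) / 2).toNat + 1 by omega, List.range_succ_eq_map]
    simp only [List.map_cons, List.map_map]
    refine congrArg₂ _ (by norm_num) (List.map_congr_left fun k _ => ?_)
    simp only [Function.comp_apply]
    push_cast
    ring
  · rw [if_neg h2n]
    rw [show n - 0 + 2 - 1 = n + 1 by ring, show ((n + 1) / 2).toNat = 1 by omega,
      List.range_one]
    norm_num

set_option maxRecDepth 10000 in
theorem pv_foldA_list : ∀ (l : List Char) (parts : List String),
    (PySem.List.pyRange 0 (l.length : Int) 2).foldl (fun parts i =>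
      if i + 1 < (l.length : Int) then
        match pvHexToChar.get? (String.ofList (PySem.Chars.upper (PySem.List.slice l (some i) (some (i + 2))))) with
        | some c => parts ++ [c]
        | none => parts
      else parts) parts = parts ++ pvPairsA l := by
  refine pvTwoStep ?_ ?_ ?_
  · intro parts
    simp only [List.length_nil, Nat.cast_zero]
    rw [show PySem.List.pyRange 0 0 2 = [] from rfl]
    simp [pvPairsA]
  · intro a parts
    rw [show ((List.length [a] : Nat) : Int) = 1 by simp]
    rw [show PySem.List.pyRange 0 (1 : Int) 2 = [0] from rfl]
    simp only [List.foldl_cons, List.foldl_nil]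
    rw [if_neg (by norm_num)]
    simp [pvPairsA]
  · intro a b t IH parts
    rw [show (((a :: b :: t).length : Nat) : Int) = (t.length : Int) + 2 by push_cast [List.length_cons]; omega]
    rw [pv_pyRange_two_cons _ (by omega)]
    simp only [List.foldl_cons]
    rw [if_pos (by omega)]
    have hsl0 : PySem.List.slice (a :: b :: t) (some 0) (some (0 + 2)) = [a, b] := by
      rw [PySem.List.slice_toNat _ (by norm_num) (by norm_num)]
      rfl
    rw [hsl0]
    have hstep : ∀ (r : Option String) (acc : List String),
        (match r with
          | some c => acc ++ [c]
          | none => acc) = acc ++ (match r with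
          | some c => [c]
          | none => []) := by
      intro r acc
      cases r <;> simp
    rw [hstep, List.foldl_map]
    rw [show (match pvHexToChar.get? (String.ofList (PySem.Chars.upper [a, b])) with
          | some c => [c]
          | none => ([] : List String)) = pvOptPart a b from rfl]
    rw [show (t.length : Int) + 2 - 2 = (t.length : Int) by ring]
    rw [PySem.List.foldl_congr_mem _ _
      (fun parts i =>
        if i + 1 < (t.length : Int) then
          match pvHexToChar.get? (String.ofList (PySem.Chars.upper (PySem.List.slice t (some i) (some (i + 2))))) with
          | some c => parts ++ [c]
          | none => parts
        else parts) _ ?_]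
    · rw [IH]
      simp [pvPairsA, List.append_assoc]
    · intro acc i him
      obtain ⟨hi0, hilt, -⟩ := (PySem.List.mem_pyRange_iff_of_pos (by norm_num) i).mp him
      have hsl : PySem.List.slice (a :: b :: t) (some (i + 2)) (some (i + 2 + 2)) =
          PySem.List.slice t (some i) (some (i + 2)) := by
        rw [PySem.List.slice_toNat _ (by omega) (by omega),
          PySem.List.slice_toNat _ (by omega) (by omega)]
        rw [show (i + 2 + 2).toNat - (i + 2).toNat = (i + 2).toNat - i.toNat by omega,
          show (i + 2).toNat = i.toNat + 1 + 1 by omega]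
        simp [List.drop_succ_cons]
      rw [hsl]
      exact if_congr (by omega) rfl rfl

theorem pv_strbridge (w : String) (a? b? : Option Int) :
    PySem.Str.upper (PySem.Str.slice w a? b?) =
      String.ofList (PySem.Chars.upper (PySem.List.slice w.toList a? b?)) := by
  rw [← String.ofList_toList (s := PySem.Str.upper (PySem.Str.slice w a? b?))]
  simp [PySem.Str.toList_upper, PySem.Str.toList_slice]

-- A's word fold produces the flatMap of pvWordOutA
set_option maxRecDepth 10000 in
theorem pv_foldA_words : ∀ (ws : List String) (parts : List String),
    ws.foldl (fun parts hexWord =>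
      if pvControlCodes.contains (PySem.Str.lower hexWord) then parts
      else
        (PySem.List.pyRange 0 (PySem.Str.len hexWord) 2).foldl (fun parts i =>
          if i + 1 < PySem.Str.len hexWord then
            match pvHexToChar.get? (PySem.Str.upper (PySem.Str.slice hexWord (some i) (some (i + 2)))) with
            | some c => parts ++ [c]
            | none => parts
          else parts) parts) parts
    = parts ++ ws.flatMap pvWordOutA := by
  intro ws
  induction ws with
  | nil => intro parts; simp
  | cons w t IH =>
    intro parts
    simp only [List.foldl_cons, List.flatMap_cons]
    have hbody : (if pvControlCodes.contains (PySem.Str.lower w) then parts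
        else
          (PySem.List.pyRange 0 (PySem.Str.len w) 2).foldl (fun parts i =>
            if i + 1 < PySem.Str.len w then
              match pvHexToChar.get? (PySem.Str.upper (PySem.Str.slice w (some i) (some (i + 2)))) with
              | some c => parts ++ [c]
              | none => parts
            else parts) parts) = parts ++ pvWordOutA w := by
      unfold pvWordOutA
      by_cases hctl : pvControlCodes.contains (PySem.Str.lower w) = true
      · rw [if_pos hctl, if_pos hctl]; simp
      · rw [if_neg hctl, if_neg hctl]
        simp only [PySem.Str.len_eq, pv_strbridge]
        exact pv_foldA_list w.toList parts
    rw [hbody, IH]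
    simp [List.append_assoc]

-- B-side: snoc behaviour of the decode state
theorem pv_decode_snoc : ∀ (cs : List Char) (c : Char),
    pvDecode (cs ++ [c]) = pvDecode cs ++ (match pvPend cs with
      | some h => if 0 ≤ h ∧ 0 ≤ pvHexVal c ∧ 32 ≤ h * 16 + pvHexVal c ∧ h * 16 + pvHexVal c ≤ 126
          then [String.ofList [Char.ofNat (h * 16 + pvHexVal c).toNat]] else []
      | none => []) := by
  refine pvTwoStep ?_ ?_ ?_
  · intro c; simp [pvDecode, pvPend]
  · intro a c; simp [pvDecode, pvPend, pvBPart]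
  · intro a b t IH c
    simp only [List.cons_append, pvDecode, pvPend, IH, List.append_assoc]

theorem pv_pend_snoc : ∀ (cs : List Char) (c : Char),
    pvPend (cs ++ [c]) = (match pvPend cs with
      | some _ => none
      | none => some (pvHexVal c)) := by
  refine pvTwoStep ?_ ?_ ?_
  · intro c; simp [pvPend]
  · intro a c; simp [pvPend]
  · intro a b t IH c
    simp only [List.cons_append, pvPend, IH]

theorem pvWordOutB_nil : pvWordOutB [] = [] := by
  unfold pvWordOutB
  split <;> rfl

-- split₀.go's accumulator can be pulled out front
theorem pv_go_acc : ∀ (s cur : List Char) (acc : List (List Char)),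
    PySem.Chars.split₀.go s cur acc = acc.reverse ++ PySem.Chars.split₀.go s cur [] := by
  intro s
  induction s with
  | nil =>
    intro cur acc
    simp only [PySem.Chars.split₀.go]
    by_cases hce : cur.isEmpty = true
    · rw [if_pos hce, if_pos hce]; simp
    · rw [if_neg hce, if_neg hce]; simp
  | cons ch rest IH =>
    intro cur acc
    simp only [PySem.Chars.split₀.go]
    by_cases hsp : PySem.Chars.isspace ch = true
    · rw [if_pos hsp, if_pos hsp]
      by_cases hce : cur.isEmpty = true
      · rw [if_pos hce, if_pos hce]
        exact IH [] acc
      · rw [if_neg hce, if_neg hce]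
        rw [IH [] (cur.reverse :: acc), IH [] [cur.reverse]]
        simp
    · rw [if_neg hsp, if_neg hsp]
      exact IH (ch :: cur) acc

theorem pv_lower_nil_iff (cs : List Char) : PySem.Chars.lower cs = [] ↔ cs = [] := by
  cases cs <;> simp [PySem.Chars.lower]

theorem pv_lower_snoc (cs : List Char) (c : Char) :
    PySem.Chars.lower (cs ++ [c]) = PySem.Chars.lower cs ++ [PySem.Chars.lowerChar c] := by
  simp [PySem.Chars.lower]

-- the flush performed at a whitespace char equals pvWordOutB
theorem pv_flush_eq (cs : List Char) (out : List String) :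
    (if PySem.Chars.lower cs ≠ [] ∧ ¬ pvControlCodesB.contains (String.ofList (PySem.Chars.lower cs))
      then out ++ pvDecode cs else out) = out ++ pvWordOutB cs := by
  unfold pvWordOutB
  rcases eq_or_ne cs [] with rfl | hne
  · have h0 : PySem.Chars.lower ([] : List Char) = [] := by simp [PySem.Chars.lower]
    rw [if_neg (by simp [h0]), h0]
    by_cases hc : pvControlCodesB.contains (String.ofList []) = true
    · rw [if_pos hc]; simp
    · rw [if_neg hc]
      rw [show pvDecode [] = [] from rfl]
      simp
  · have hl : PySem.Chars.lower cs ≠ [] := fun h => hne ((pv_lower_nil_iff cs).mp h)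
    by_cases hctl : pvControlCodesB.contains (String.ofList (PySem.Chars.lower cs)) = true
    · rw [if_neg (fun h => h.2 hctl), if_pos hctl]
      simp
    · rw [if_pos ⟨hl, hctl⟩, if_neg hctl]


-- the main run lemma: B's machine over s ++ [' '] computes the word decomposition
theorem pv_runB : ∀ (s cs : List Char) (out : List String),
    ((s ++ [' ']).foldl pvStepB (out, PySem.Chars.lower cs, pvDecode cs, pvPend cs)).1
      = out ++ (PySem.Chars.split₀.go s cs.reverse []).flatMap pvWordOutB := by
  intro s
  have hsp' : PySem.Chars.isspace ' ' = true := by decide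
  have hlow : PySem.Chars.lower ([] : List Char) = [] := by simp [PySem.Chars.lower]
  induction s with
  | nil =>
    intro cs out
    simp only [List.nil_append, List.foldl_cons, List.foldl_nil, pvStepB, hsp', if_true]
    rw [pv_flush_eq cs out]
    simp only [PySem.Chars.split₀.go]
    by_cases hce : cs.reverse.isEmpty = true
    · obtain rfl : cs = [] := by simpa using hce
      rw [if_pos hce]
      simp [pvWordOutB_nil]
    · rw [if_neg hce]
      simp
  | cons c rest IH =>
    intro cs out
    simp only [List.cons_append, List.foldl_cons]
    by_cases hsp : PySem.Chars.isspace c = true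
    · have hstep : pvStepB (out, PySem.Chars.lower cs, pvDecode cs, pvPend cs) c
          = (out ++ pvWordOutB cs, [], [], none) := by
        simp only [pvStepB, hsp, if_true]
        rw [← pv_flush_eq cs out]
      rw [hstep]
      have hIH := IH [] (out ++ pvWordOutB cs)
      rw [hlow, show pvDecode [] = [] from rfl, show pvPend [] = none from rfl,
        List.reverse_nil] at hIH
      rw [hIH]
      simp only [PySem.Chars.split₀.go, hsp, if_true]
      by_cases hce : cs.reverse.isEmpty = true
      · obtain rfl : cs = [] := by simpa using hce
        rw [if_pos hce]
        simp [pvWordOutB_nil]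
      · rw [if_neg hce]
        rw [pv_go_acc rest [] [cs.reverse.reverse]]
        simp [List.append_assoc]
    · have hstep : pvStepB (out, PySem.Chars.lower cs, pvDecode cs, pvPend cs) c
          = (out, PySem.Chars.lower (cs ++ [c]), pvDecode (cs ++ [c]), pvPend (cs ++ [c])) := by
        simp only [pvStepB, hsp, if_false, Bool.false_eq_true]
        rw [pv_lower_snoc, pv_decode_snoc, pv_pend_snoc]
        cases hp : pvPend cs with
        | none => simp
        | some h =>
          have hd : (if 0 ≤ h ∧ 0 ≤ pvHexVal c ∧ 32 ≤ h * 16 + pvHexVal c ∧ h * 16 + pvHexVal c ≤ 126 then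
              pvDecode cs ++ [String.ofList [Char.ofNat (h * 16 + pvHexVal c).toNat]]
            else pvDecode cs) = pvDecode cs ++
              (if 0 ≤ h ∧ 0 ≤ pvHexVal c ∧ 32 ≤ h * 16 + pvHexVal c ∧ h * 16 + pvHexVal c ≤ 126 then
                [String.ofList [Char.ofNat (h * 16 + pvHexVal c).toNat]] else []) := by
            split <;> simp
          simp only [hd]
      rw [hstep, IH (cs ++ [c]) out]
      simp only [PySem.Chars.split₀.go, hsp, if_false, Bool.false_eq_true]
      rw [show (cs ++ [c]).reverse = c :: cs.reverse by simp]


-- word-level A = B bridge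
theorem pv_pairs_decode : ∀ (cs : List Char), (∀ c ∈ cs, pvDomChar c = true) →
    pvPairsA cs = pvDecode cs := by
  refine pvTwoStep (by intro _; rfl) (by intro a _; rfl) ?_
  intro a b t IH hdom
  simp only [pvPairsA, pvDecode]
  rw [IH (fun c hc => hdom c (by simp [hc])),
    pv_pair_eq a b (hdom a (by simp)) (hdom b (by simp))]

theorem pv_wordOut_eq (w : String) (hw : ∀ c ∈ w.toList, pvDomChar c = true) :
    pvWordOutA w = pvWordOutB w.toList := by
  unfold pvWordOutA pvWordOutB
  have hcc : pvControlCodesB = pvControlCodes := rfl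
  have hlw : PySem.Str.lower w = String.ofList (PySem.Chars.lower w.toList) := by
    rw [← String.ofList_toList (s := PySem.Str.lower w), PySem.Str.toList_lower]
  rw [hcc, hlw, pv_pairs_decode w.toList hw]

-- ===== VERDICT (by name: the statement is the Claim_ definition above) =====
theorem extract_text_from_hex_spec : Claim_equal_extract_text_from_hex := by
  intro hex_data hdom
  unfold Spec_extract_text_from_hex
  have hdom' : ∀ c ∈ hex_data.toList, pvDomChar c = true := by
    simpa [Dom_extract_text_from_hex, pvDomStr, List.all_eq_true] using hdom
  -- A side
  simp only [extract_text_from_hex]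
  rw [pv_foldA_words (PySem.Str.split₀ hex_data) []]
  -- B side
  simp only [extract_text_from_hex_alt]
  have hrun := pv_runB hex_data.toList [] []
  simp only [List.reverse_nil] at hrun
  rw [show (PySem.Chars.split₀.go hex_data.toList [] []) = PySem.Chars.split₀ hex_data.toList from rfl] at hrun
  have hB : ((hex_data.toList ++ [' ']).foldl pvStepB ([], [], [], none)).1
      = (PySem.Chars.split₀ hex_data.toList).flatMap pvWordOutB := by
    rw [show (([], [], [], none) : List String × List Char × List String × Option Int)
        = ([], PySem.Chars.lower [], pvDecode [], pvPend []) by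
          refine Prod.ext (by rfl) (Prod.ext (by simp [PySem.Chars.lower]) (Prod.ext (by rfl) (by rfl)))]
    simpa using hrun
  rw [hB]
  -- bridge the word lists
  rw [← PySem.Str.split₀_map_toList, List.flatMap_map]
  simp only [List.nil_append]
  refine congrArg (PySem.Str.join "") (List.flatMap_congr ?_)
  · intro w hwmem
    have hwchars : ∀ c ∈ w.toList, pvDomChar c = true := by
      intro c hc
      have hmem : w.toList ∈ PySem.Chars.split₀ hex_data.toList := by
        rw [← PySem.Str.split₀_map_toList]
        exact List.mem_map_of_mem hwmem
      exact hdom' c (pv_split₀_chars hex_data.toList w.toList hmem c hc)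
    exact pv_wordOut_eq w hwchars
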